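-- pv_equiv track=rewrite | github.com/priyanshu-maity/encoding | encoding/text/transposition.py | __get_order_list
-- ===== SOURCE A (Python) =====
-- def __get_order_list(text: str) -> list:
--     lst = [ord(i) for i in text]
--     order = 0
--     for i in range(65, 91):
--         for j in range(len(lst)):
--             if lst[j] == i:
--                 lst[j] = order
--                 order += 1
--
--     return lst
-- ===== SOURCE B (Python) =====
-- def __get_order_list(text: str) -> list:
--     # Counting sort over the 26 uppercase letters: one counting pass, prefix
--     # sums for the starting rank of each letter, one output pass.
--     lst = [ord(c) for c in text]
--     counts = [0] * 26
--     for v in lst: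
--         if 65 <= v <= 90:
--             counts[v - 65] += 1
--     nxt = [0] * 26
--     run = 0
--     for k in range(26):
--         nxt[k] = run
--         run += counts[k]
--     res = []
--     for v in lst:
--         if 65 <= v <= 90:
--             res.append(nxt[v - 65])
--             nxt[v - 65] += 1
--         else:
--             res.append(v)
--     return res
-- ===== Notes on version B (the rewrite author's own statement) =====
-- stated objective: faster
-- what changed: Replaces A's 26 full passes over the array (one per letter) by a counting sort: one counting pass, prefix sums over the 26 letters, and one output pass assigning each letter its offset plus running count.
-- intended difference: On texts where some letter's block of ranks reaches past its own character code into 66..90 (at least 67 uppercase letters), A's later letter passes re-match the just-assigned rank values and overwrite them (on the 67-letter witness A's last entry is 91), while B returns the intended alphabetical ranks; B's value is the intended stable letter ranking. — e.g. on __get_order_list("AAAAAAAAAAAAAAAAAAAAAAAAAAAAAAAAAAAAAAAAAAAAAAAAAAAAAAAAAAAAAAAAAAA"): A returns [0, 1, 2, 3, 4, 5, 6, 7, 8, 9, 10, 11, 12, 13, 14, 15, 16, 17, 18, 19, 20, 21, 22, 23, 24, 25, 26, 27, 28, 29, 30, 31, …, B returns [0, 1, 2, 3, 4, 5, 6, 7,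 8, 9, 10, 11, 12, 13, 14, 15, 16, 17, 18, 19, 20, 21, 22, 23, 24, 25, 26, 27, 28, 29, 30, 31, …
import Mathlib
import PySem

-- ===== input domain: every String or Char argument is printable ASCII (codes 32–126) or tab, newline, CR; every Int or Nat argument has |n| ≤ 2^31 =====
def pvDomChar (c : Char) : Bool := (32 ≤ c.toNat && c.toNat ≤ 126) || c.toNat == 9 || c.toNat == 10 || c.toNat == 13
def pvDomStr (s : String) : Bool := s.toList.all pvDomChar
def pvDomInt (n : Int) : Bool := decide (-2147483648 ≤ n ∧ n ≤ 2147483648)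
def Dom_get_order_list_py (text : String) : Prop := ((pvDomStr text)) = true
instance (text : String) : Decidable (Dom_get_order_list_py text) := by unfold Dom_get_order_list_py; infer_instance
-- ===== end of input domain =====

-- B replaces A's 26 full passes over the array by a counting sort (count, prefix sums, one
-- assigning pass); on texts with ≥ 67 uppercase letters A's later passes re-match freshly
-- assigned rank values (an accident of reusing the array for ranks), stated below as D_.

-- shared by both ports: 'lst = [ord(i) for i in text]'
def ords (text : String) : List Int := text.toList.map (fun c => (c.toNat : Int))

-- ===== PORT A =====
-- inner loop body: 'if lst[j] == i: lst[j] = order; order += 1'; state = (lst, order)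
def aStep (i : Int) (s : List Int × Int) (j : Int) : List Int × Int :=
  match PySem.List.pyGet? s.1 j with
  | some v => if v = i then (PySem.List.pySetD s.1 j s.2, s.2 + 1) else s
  | none => s

def get_order_list_py (text : String) : List Int :=
  let lst := ords text
  ((PySem.List.pyRange 65 91 1).foldl
    (fun s i => (PySem.List.pyRange 0 (s.1.length : Int) 1).foldl (aStep i) s)
    (lst, 0)).1

-- ===== PORT B =====
-- counting pass: 'if 65 <= v <= 90: counts[v-65] += 1'
def bCount (cs : List Int) (v : Int) : List Int :=
  if 65 ≤ v ∧ v ≤ 90 then PySem.List.pySetD cs (v - 65) (PySem.List.pyGetD cs (v - 65) 0 + 1) else cs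

-- prefix sums: 'nxt[k] = run; run += counts[k]'
def bOffs (counts : List Int) (p : List Int × Int) (k : Int) : List Int × Int :=
  (PySem.List.pySetD p.1 k p.2, p.2 + PySem.List.pyGetD counts k 0)

-- output pass: 'res.append(nxt[v-65]); nxt[v-65] += 1' / 'res.append(v)'
def bOut (st : List Int × List Int) (v : Int) : List Int × List Int :=
  if 65 ≤ v ∧ v ≤ 90 then
    (st.1 ++ [PySem.List.pyGetD st.2 (v - 65) 0],
     PySem.List.pySetD st.2 (v - 65) (PySem.List.pyGetD st.2 (v - 65) 0 + 1))
  else (st.1 ++ [v], st.2)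

def get_order_list_py_alt (text : String) : List Int :=
  let lst := ords text
  let counts := lst.foldl bCount (List.replicate 26 (0 : Int))
  let nxt := ((PySem.List.pyRange 0 26 1).foldl (bOffs counts) (List.replicate 26 (0 : Int), 0)).1
  (lst.foldl bOut (([] : List Int), nxt)).1

-- ===== PRECONDITION & SPEC =====
-- number of uppercase codes below i in the text
def upTo (text : String) (i : Int) : Int :=
  ((ords text).countP (fun x => decide (65 ≤ x ∧ x < i)) : Int)

-- On texts where some letter's block of ranks reaches past its own character code into 66..90
-- (≥ 67 uppercase letters), A's later passes re-match the freshly assigned rank values and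
-- overwrite them (on the 67-letter witness A's last entry is 91); B returns the intended ranks.
def D_get_order_list_py (text : String) : Prop :=
  ∃ i ∈ PySem.List.pyRange 65 90 1, upTo text i ≤ 90 ∧ i + 2 ≤ upTo text (i + 1)
instance (text : String) : Decidable (D_get_order_list_py text) := by
  unfold D_get_order_list_py; infer_instance

def Spec_get_order_list_py (text : String) (out : List Int) : Prop :=
  ¬ D_get_order_list_py text → out = get_order_list_py_alt text
instance (text : String) (out : List Int) : Decidable (Spec_get_order_list_py text out) := by
  unfold Spec_get_order_list_py; infer_instance

def pvDiffWitness_get_order_list_py : String :=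
  "AAAAAAAAAAAAAAAAAAAAAAAAAAAAAAAAAAAAAAAAAAAAAAAAAAAAAAAAAAAAAAAAAAA"
def pvDiffWitnessOut_get_order_list_py : (List Int) × (List Int) :=
  ([0, 1, 2, 3, 4, 5, 6, 7, 8, 9, 10, 11, 12, 13, 14, 15, 16, 17, 18, 19, 20, 21, 22, 23, 24,
    25, 26, 27, 28, 29, 30, 31, 32, 33, 34, 35, 36, 37, 38, 39, 40, 41, 42, 43, 44, 45, 46, 47,
    48, 49, 50, 51, 52, 53, 54, 55, 56, 57, 58, 59, 60, 61, 62, 63, 64, 65, 91],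
   [0, 1, 2, 3, 4, 5, 6, 7, 8, 9, 10, 11, 12, 13, 14, 15, 16, 17, 18, 19, 20, 21, 22, 23, 24,
    25, 26, 27, 28, 29, 30, 31, 32, 33, 34, 35, 36, 37, 38, 39, 40, 41, 42, 43, 44, 45, 46, 47,
    48, 49, 50, 51, 52, 53, 54, 55, 56, 57, 58, 59, 60, 61, 62, 63, 64, 65, 66])

-- ===== CLAIM (what is proved, stated in full; the proofs are below) =====
def Claim_unchanged_get_order_list_py : Prop :=
  ∀ (text : String), Dom_get_order_list_py text →
    Spec_get_order_list_py text (get_order_list_py text)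
def Claim_changed_get_order_list_py : Prop :=
  Dom_get_order_list_py (pvDiffWitness_get_order_list_py) ∧
  D_get_order_list_py (pvDiffWitness_get_order_list_py) ∧
  get_order_list_py (pvDiffWitness_get_order_list_py) = pvDiffWitnessOut_get_order_list_py.1 ∧
  get_order_list_py_alt (pvDiffWitness_get_order_list_py) = pvDiffWitnessOut_get_order_list_py.2 ∧
  pvDiffWitnessOut_get_order_list_py.1 ≠ pvDiffWitnessOut_get_order_list_py.2
def Claim_exact_get_order_list_py : Prop :=
  ∀ (text : String), Dom_get_order_list_py text → D_get_order_list_py text →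
    get_order_list_py text ≠ get_order_list_py_alt text

-- ===== LEMMAS AND PROOFS =====

-- the countP predicate, in Prop-decide form
theorem cntP_key (j : Int) (L : List Int) :
    L.countP (fun x => decide (65 ≤ x) && decide (x < j))
      = L.countP (fun x => decide (65 ≤ x ∧ x < j)) := by
  apply List.countP_congr
  intro x _
  by_cases h1 : 65 ≤ x <;> by_cases h2 : x < j <;> simp [h1, h2]

-- counts over the ord list (proof-side)
def cntEqI (l : List Int) (i : Int) : Int := (l.count i : Int)
def cntLtI (l : List Int) (i : Int) : Int :=
  ((l.countP (fun x => decide (65 ≤ x) && decide (x < i))) : Int)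

theorem upTo_eq (text : String) (i : Int) : upTo text i = cntLtI (ords text) i := by
  unfold upTo cntLtI
  rw [cntP_key]

-- reference semantics of one of A's passes: walk the list once, replacing value i by
-- consecutive order numbers
def passF (i : Int) : List Int → Int → List Int × Int
  | [], o => ([], o)
  | x :: xs, o =>
    if x = i then
      let p := passF i xs (o + 1); (o :: p.1, p.2)
    else
      let p := passF i xs o; (x :: p.1, p.2)

-- A's passes a..90 as a fold
def afold (a : Int) (l : List Int) (o : Int) : List Int × Int :=
  (PySem.List.pyRange a 91 1).foldl (fun s i => passF i s.1 s.2) (l, o)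

-- counting-sort relabelling of the suffix `suf` of `full` after prefix `pre`, for letters < i
def relabSuf (i : Int) (full : List Int) : List Int → List Int → List Int
  | _, [] => []
  | pre, x :: xs =>
    (if 65 ≤ x ∧ x < i then cntLtI full x + (pre.count x : Int) else x)
    :: relabSuf i full (pre ++ [x]) xs

-- A's inner index loop over the suffix after `pre` is passF on that suffix
theorem lemA (i : Int) (l pre : List Int) (o : Int) :
    (PySem.List.pyRange (pre.length : Int) ((pre.length : Int) + l.length) 1).foldl
      (aStep i) (pre ++ l, o)
    = (pre ++ (passF i l o).1, (passF i l o).2) := by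
  induction l generalizing pre o with
  | nil =>
    rw [show ((pre.length : Int) + (([] : List Int).length : Int)) = (pre.length : Int) by simp]
    simp [PySem.List.pyRange_one_eq_nil (le_refl _), passF]
  | cons x xs ih =>
    have hlt : (pre.length : Int) < (pre.length : Int) + ((x :: xs).length : Int) := by
      simp
    rw [PySem.List.pyRange_one_cons hlt, List.foldl_cons]
    simp only [aStep, PySem.List.pyGet?_append_length]
    by_cases hx : x = i
    · rw [if_pos hx]
      simp only [PySem.List.pySetD_natCast,
        List.set_append_right _ _ (Nat.le_refl _), Nat.sub_self, List.set_cons_zero]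
      have e1 : ((pre.length : Int) + 1) = (((pre ++ [o]).length : Nat) : Int) := by simp
      have e2 : ((pre.length : Int) + ((x :: xs).length : Int))
          = (((pre ++ [o]).length : Nat) : Int) + ((xs.length : Nat) : Int) := by
        simp; ring
      rw [e1, e2, show pre ++ o :: xs = (pre ++ [o]) ++ xs by simp, ih]
      simp [passF, hx]
    · rw [if_neg hx]
      have e1 : ((pre.length : Int) + 1) = (((pre ++ [x]).length : Nat) : Int) := by simp
      have e2 : ((pre.length : Int) + ((x :: xs).length : Int))
          = (((pre ++ [x]).length : Nat) : Int) + ((xs.length : Nat) : Int) := by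
        simp; ring
      rw [e1, e2, show pre ++ x :: xs = (pre ++ [x]) ++ xs by simp, ih]
      simp [passF, hx]

-- each of A's passes is passF
theorem lemAinner (i : Int) (s : List Int × Int) :
    (PySem.List.pyRange 0 (s.1.length : Int) 1).foldl (aStep i) s = passF i s.1 s.2 := by
  have h := lemA i s.1 [] s.2
  simpa using h

-- equation lemmas
theorem passF_nil (i o : Int) : passF i [] o = ([], o) := rfl
theorem passF_cons (i x : Int) (xs : List Int) (o : Int) :
    passF i (x :: xs) o
      = if x = i then ((o :: (passF i xs (o + 1)).1), (passF i xs (o + 1)).2)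
        else ((x :: (passF i xs o).1), (passF i xs o).2) := rfl

theorem relabSuf_nil (i : Int) (full pre : List Int) : relabSuf i full pre [] = [] := rfl
theorem relabSuf_cons (i : Int) (full pre : List Int) (x : Int) (xs : List Int) :
    relabSuf i full pre (x :: xs)
      = (if 65 ≤ x ∧ x < i then cntLtI full x + (pre.count x : Int) else x)
        :: relabSuf i full (pre ++ [x]) xs := rfl

-- port A is the passF fold
theorem A_eq_afold (text : String) :
    get_order_list_py text = (afold 65 (ords text) 0).1 := by
  have hstep : (fun (s : List Int × Int) (i : Int) =>
      (PySem.List.pyRange 0 (s.1.length : Int) 1).foldl (aStep i) s)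
      = (fun (s : List Int × Int) (i : Int) => passF i s.1 s.2) :=
    funext fun s => funext fun i => lemAinner i s
  unfold get_order_list_py afold
  rw [hstep]

-- counting facts
theorem cntLtI_65 (l : List Int) : cntLtI l 65 = 0 := by
  unfold cntLtI
  rw [cntP_key 65 l]
  have h0 : l.countP (fun x => decide (65 ≤ x ∧ x < 65)) = 0 :=
    List.countP_eq_zero.2 (fun x _ => by
      simp only [decide_eq_true_eq]; omega)
  rw [h0]
  rfl

theorem cntLtI_succ (l : List Int) (i : Int) (h : 65 ≤ i) :
    cntLtI l (i + 1) = cntLtI l i + cntEqI l i := by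
  unfold cntLtI cntEqI
  rw [cntP_key (i + 1) l, cntP_key i l]
  induction l with
  | nil => simp
  | cons x xs ih =>
    simp only [List.countP_cons, List.count_cons, decide_eq_true_eq, beq_iff_eq]
    split_ifs <;> push_cast at ih ⊢ <;> omega

theorem cntEqI_nonneg (l : List Int) (i : Int) : 0 ≤ cntEqI l i := by
  unfold cntEqI; positivity

theorem relabSuf_65 (full : List Int) (pre suf : List Int) :
    relabSuf 65 full pre suf = suf := by
  induction suf generalizing pre with
  | nil => rfl
  | cons x xs ih =>
    rw [relabSuf_cons, if_neg (by omega), ih]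

-- one of A's passes on the partially relabelled list performs exactly the next relabelling
-- step, provided no already-assigned rank can equal the current pass value i
theorem passLemma (i : Int) (full : List Int)
    (h65 : 65 ≤ i) (h90 : i ≤ 90)
    (H : ∀ x, 65 ≤ x → x < i →
      cntEqI full x = 0 ∨ cntLtI full x + cntEqI full x - 1 ≤ x ∨ 90 < cntLtI full x) :
    ∀ (suf pre : List Int), full = pre ++ suf →
    passF i (relabSuf i full pre suf) (cntLtI full i + (pre.count i : Int))
      = (relabSuf (i + 1) full pre suf,
         cntLtI full i + (pre.count i : Int) + (suf.count i : Int)) := by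
  intro suf
  induction suf with
  | nil => intro pre _; simp [relabSuf_nil, passF_nil]
  | cons x xs ih =>
    intro pre hfull
    have hcnt : full.count x = pre.count x + (x :: xs).count x := by
      rw [hfull, List.count_append]
    have hsufc : 1 ≤ (x :: xs).count x := by simp [List.count_cons]
    rw [relabSuf_cons, relabSuf_cons (i + 1)]
    by_cases hc1 : 65 ≤ x ∧ x < i
    · -- already relabelled cell: its rank is never i
      have hy : cntLtI full x + (pre.count x : Int) ≠ i := by
        rcases H x hc1.1 hc1.2 with h0 | h1 | h2
        · exfalso
          unfold cntEqI at h0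
          have : (full.count x : Int) = (pre.count x : Int) + ((x :: xs).count x : Int) := by
            push_cast [hcnt]; ring
          have h1' : (1 : Int) ≤ ((x :: xs).count x : Int) := by exact_mod_cast hsufc
          have h0' : (0 : Int) ≤ (pre.count x : Int) := by positivity
          omega
        · unfold cntEqI at h1
          have : (full.count x : Int) = (pre.count x : Int) + ((x :: xs).count x : Int) := by
            push_cast [hcnt]; ring
          have h1' : (1 : Int) ≤ ((x :: xs).count x : Int) := by exact_mod_cast hsufc
          omega
        · have : (0 : Int) ≤ (pre.count x : Int) := by positivity
          omega
      have hx_ne : x ≠ i := by omega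
      rw [if_pos hc1, if_pos ⟨hc1.1, by omega⟩, passF_cons, if_neg hy]
      have ihh := ih (pre ++ [x]) (by simpa using hfull)
      rw [show (pre ++ [x]).count i = pre.count i by
        simp [List.count_append, List.count_singleton, hx_ne]] at ihh
      rw [ihh]
      simp only [Prod.mk.injEq, true_and]
      exact congrArg _ (congrArg _ (List.count_cons_of_ne hx_ne).symm)
    · by_cases hc2 : x = i
      · subst hc2
        rw [if_neg hc1, if_pos ⟨by omega, by omega⟩, passF_cons, if_pos rfl]
        have hpc : (pre ++ [x]).count x = pre.count x + 1 := by
          rw [List.count_append]; simp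
        have ihh := ih (pre ++ [x]) (by simpa using hfull)
        have ihh' : passF x (relabSuf x full (pre ++ [x]) xs)
            (cntLtI full x + (pre.count x : Int) + 1)
            = (relabSuf (x + 1) full (pre ++ [x]) xs,
               cntLtI full x + (pre.count x : Int) + 1 + (xs.count x : Int)) := by
          rw [show cntLtI full x + (pre.count x : Int) + 1
              = cntLtI full x + ((pre ++ [x]).count x : Int) by push_cast [hpc]; ring]
          rw [ihh]
        rw [ihh']
        simp only [Prod.mk.injEq, true_and]
        rw [List.count_cons_self]
        push_cast
        ring
      · -- untouched cell (non-letter, or letter ≥ i+1)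
        rw [if_neg hc1, if_neg (fun hh : 65 ≤ x ∧ x < i + 1 => hc1 ⟨hh.1, by omega⟩),
          passF_cons, if_neg hc2]
        have ihh := ih (pre ++ [x]) (by simpa using hfull)
        rw [show (pre ++ [x]).count i = pre.count i by
          simp [List.count_append, List.count_singleton, hc2]] at ihh
        rw [ihh]
        simp only [Prod.mk.injEq, true_and]
        exact congrArg _ (congrArg _ (List.count_cons_of_ne hc2).symm)

-- running A's passes a..(a+n) from the a-relabelled state reaches the (a+n)-relabelled state
theorem foldRange (full : List Int) :
    ∀ (n : Nat) (a : Int), 65 ≤ a → a + n ≤ 91 →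
    (H : ∀ x, 65 ≤ x → x ≤ 89 → x < a + n →
      cntEqI full x = 0 ∨ cntLtI full x + cntEqI full x - 1 ≤ x ∨ 90 < cntLtI full x) →
    (PySem.List.pyRange a (a + n) 1).foldl (fun s i => passF i s.1 s.2)
      (relabSuf a full [] full, cntLtI full a)
    = (relabSuf (a + n) full [] full, cntLtI full (a + n)) := by
  intro n
  induction n with
  | zero =>
    intro a _ _ _
    simp [PySem.List.pyRange_one_eq_nil (by omega : a + (0 : Nat) ≤ a)]
  | succ n ih =>
    intro a ha hb H
    rw [PySem.List.pyRange_one_cons (by push_cast; omega), List.foldl_cons]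
    have hp := passLemma a full ha (by push_cast at hb; omega)
      (fun x hx1 hx2 => H x hx1 (by push_cast at hb; omega) (by push_cast; omega)) full [] rfl
    simp only [List.count_nil, Nat.cast_zero, add_zero] at hp
    rw [hp]
    have hc : cntLtI full a + (full.count a : Int) = cntLtI full (a + 1) := by
      rw [cntLtI_succ full a ha]; rfl
    rw [hc]
    have e1 : a + ((n : Int) + 1) = (a + 1) + (n : Int) := by ring
    have e2 : (a + (((n + 1 : Nat)) : Int)) = (a + 1) + (n : Int) := by push_cast; ring
    rw [e2]
    have := ih (a + 1) (by omega) (by push_cast at hb ⊢; omega)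
      (fun x hx1 hx2 hx3 => H x hx1 hx2 (by push_cast at hx3 ⊢; omega))
    rw [show (a + 1) + (n : Int) = a + 1 + (n : Int) by ring] at this
    exact this

-- ===== B bridging: port B computes the full relabelling =====

-- counting pass
theorem bCountLemma (l : List Int) :
    ∀ (cs : List Int), cs.length = 26 →
      (l.foldl bCount cs).length = 26 ∧
      ∀ k : Nat, k < 26 → (l.foldl bCount cs).getD k 0 = cs.getD k 0 + cntEqI l (65 + k) := by
  induction l with
  | nil => intro cs h; refine ⟨h, fun k _ => by simp [cntEqI]⟩
  | cons v xs ih =>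
    intro cs hlen
    by_cases hv : 65 ≤ v ∧ v ≤ 90
    · have hm : (v - 65).toNat < cs.length := by omega
      have hset : bCount cs v = cs.set (v - 65).toNat (PySem.List.pyGetD cs (v - 65) 0 + 1) := by
        unfold bCount
        rw [if_pos hv, PySem.List.pySetD_of_nonneg _ _ (by omega)]
      have hget : PySem.List.pyGetD cs (v - 65) 0 = cs.getD (v - 65).toNat 0 := by
        rw [PySem.List.pyGetD_of_nonneg _ _ (by omega)]
      have hlen' : (bCount cs v).length = 26 := by
        rw [hset, List.length_set, hlen]
      obtain ⟨hl, hrest⟩ := ih (bCount cs v) hlen'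
      refine ⟨by simpa [List.foldl_cons] using hl, fun k hk => ?_⟩
      have := hrest k hk
      rw [List.foldl_cons] at *
      rw [this]
      have hcount : cntEqI (v :: xs) (65 + k) =
          cntEqI xs (65 + k) + (if v = 65 + (k : Int) then 1 else 0) := by
        unfold cntEqI
        simp only [List.count_cons, beq_iff_eq]
        split <;> push_cast <;> ring
      rw [hcount]
      by_cases hkv : (k : Int) = v - 65
      · have : (v - 65).toNat = k := by omega
        rw [hset, hget]
        have hgd : (cs.set (v - 65).toNat (cs.getD (v - 65).toNat 0 + 1)).getD k 0
            = cs.getD k 0 + 1 := by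
          rw [this]
          rw [List.getD_eq_getElem?_getD, List.getD_eq_getElem?_getD,
            List.getElem?_set_self (by omega)]
          simp [List.getD_eq_getElem?_getD]
        rw [hgd, if_pos (by omega)]
        ring
      · rw [hset]
        have hgd : (cs.set (v - 65).toNat (PySem.List.pyGetD cs (v - 65) 0 + 1)).getD k 0
            = cs.getD k 0 := by
          rw [List.getD_eq_getElem?_getD, List.getD_eq_getElem?_getD,
            List.getElem?_set_ne (by omega)]
        rw [hgd, if_neg (by omega)]
        ring
    · have hset : bCount cs v = cs := by unfold bCount; rw [if_neg hv]
      obtain ⟨hl, hrest⟩ := ih cs hlen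
      rw [List.foldl_cons, hset]
      refine ⟨hl, fun k hk => ?_⟩
      rw [hrest k hk]
      have : cntEqI (v :: xs) (65 + k) = cntEqI xs (65 + k) := by
        unfold cntEqI
        have : v ≠ 65 + (k : Int) := by omega
        simp [List.count_cons, this]
      rw [this]

-- prefix-sum pass
theorem bOffsLemma (counts full : List Int)
    (hc : ∀ k : Nat, k < 26 → counts.getD k 0 = cntEqI full (65 + k)) :
    ∀ (n : Nat) (a : Nat) (ns : List Int) (run : Int), a + n = 26 → ns.length = 26 →
    run = cntLtI full (65 + a) →
    (∀ j : Nat, j < a → ns.getD j 0 = cntLtI full (65 + j)) →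
    (∀ j : Nat, j < 26 →
      (((PySem.List.pyRange a 26 1).foldl (bOffs counts) (ns, run)).1).getD j 0
        = cntLtI full (65 + j)) := by
  intro n
  induction n with
  | zero =>
    intro a ns run ha _ _ hbelow j hj
    have : a = 26 := by omega
    subst this
    rw [PySem.List.pyRange_one_eq_nil (by norm_num)]
    exact hbelow j hj
  | succ n ih =>
    intro a ns run ha hlen hrun hbelow j hj
    rw [PySem.List.pyRange_one_cons (by push_cast; omega), List.foldl_cons]
    have hset : bOffs counts (ns, run) a
        = (ns.set a run, run + PySem.List.pyGetD counts (a : Int) 0) := by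
      unfold bOffs
      rw [PySem.List.pySetD_of_nonneg _ _ (by positivity)]
      simp
    rw [hset]
    have hrun' : run + PySem.List.pyGetD counts (a : Int) 0 = cntLtI full (65 + (a + 1 : Nat)) := by
      rw [PySem.List.pyGetD_of_nonneg _ _ (by positivity)]
      simp only [Int.toNat_natCast]
      rw [hc a (by omega), hrun]
      rw [show ((65 : Int) + ((a + 1 : Nat) : Int)) = (65 + (a : Int)) + 1 by push_cast; ring]
      rw [cntLtI_succ full _ (by omega)]
    have hbelow' : ∀ j : Nat, j < a + 1 → (ns.set a run).getD j 0 = cntLtI full (65 + j) := by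
      intro j hja
      by_cases hje : j = a
      · subst hje
        rw [List.getD_eq_getElem?_getD, List.getElem?_set_self (by omega)]
        simp [hrun]
      · rw [List.getD_eq_getElem?_getD, List.getElem?_set_ne (by omega),
          ← List.getD_eq_getElem?_getD]
        exact hbelow j (by omega)
    have := ih (a + 1) (ns.set a run) _ (by omega) (by simp [hlen]) hrun' hbelow' j hj
    rw [show ((a : Int) + 1) = (((a + 1 : Nat)) : Int) by push_cast; ring]
    exact this

-- output pass
theorem bOutLemma (full : List Int) :
    ∀ (suf pre acc : List Int) (ns : List Int), ns.length = 26 →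
    (∀ k : Nat, k < 26 → ns.getD k 0 = cntLtI full (65 + k) + (pre.count (65 + (k : Int)) : Int)) →
    (suf.foldl bOut (acc, ns)).1 = acc ++ relabSuf 91 full pre suf := by
  intro suf
  induction suf with
  | nil => intro pre acc ns _ _; simp [relabSuf]
  | cons x xs ih =>
    intro pre acc ns hlen hns
    rw [List.foldl_cons]
    by_cases hx : 65 ≤ x ∧ x ≤ 90
    · have hm : (x - 65).toNat < 26 := by omega
      have hxk : x = 65 + (((x - 65).toNat : Nat) : Int) := by omega
      have hget : PySem.List.pyGetD ns (x - 65) 0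
          = cntLtI full x + (pre.count x : Int) := by
        rw [PySem.List.pyGetD_of_nonneg _ _ (by omega)]
        have := hns (x - 65).toNat hm
        rw [← hxk] at this
        exact this
      have hstep : bOut (acc, ns) x
          = (acc ++ [cntLtI full x + (pre.count x : Int)],
             ns.set (x - 65).toNat (PySem.List.pyGetD ns (x - 65) 0 + 1)) := by
        unfold bOut
        rw [if_pos hx, PySem.List.pySetD_of_nonneg _ _ (by omega)]
        simp [hget]
      rw [hstep]
      have hns' : ∀ k : Nat, k < 26 →
          (ns.set (x - 65).toNat (PySem.List.pyGetD ns (x - 65) 0 + 1)).getD k 0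
            = cntLtI full (65 + k) + (((pre ++ [x]).count (65 + (k : Int))) : Int) := by
        intro k hk
        by_cases hke : k = (x - 65).toNat
        · subst hke
          rw [List.getD_eq_getElem?_getD, List.getElem?_set_self (by omega)]
          simp only [Option.getD_some]
          rw [hget]
          have hcnt : ((pre ++ [x]).count (65 + ((((x - 65).toNat : Nat)) : Int)) : Int)
              = (pre.count x : Int) + 1 := by
            rw [← hxk]
            simp [List.count_append]
          rw [hcnt, ← hxk]
          ring
        · rw [List.getD_eq_getElem?_getD, List.getElem?_set_ne (by omega),
            ← List.getD_eq_getElem?_getD, hns k hk]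
          have : (pre ++ [x]).count (65 + (k : Int)) = pre.count (65 + (k : Int)) := by
            have : x ≠ 65 + (k : Int) := by omega
            simp [List.count_append, this]
          rw [this]
      have := ih (pre ++ [x]) (acc ++ [cntLtI full x + (pre.count x : Int)])
        (ns.set (x - 65).toNat (PySem.List.pyGetD ns (x - 65) 0 + 1)) (by simp [hlen]) hns'
      rw [this, relabSuf_cons, if_pos ⟨hx.1, by omega⟩]
      simp
    · have hstep : bOut (acc, ns) x = (acc ++ [x], ns) := by
        unfold bOut; rw [if_neg hx]
      rw [hstep]
      have hns' : ∀ k : Nat, k < 26 →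
          ns.getD k 0 = cntLtI full (65 + k) + (((pre ++ [x]).count (65 + (k : Int))) : Int) := by
        intro k hk
        rw [hns k hk]
        have : x ≠ 65 + (k : Int) := by omega
        simp [List.count_append, this]
      have := ih (pre ++ [x]) (acc ++ [x]) ns hlen hns'
      rw [this, relabSuf_cons, if_neg (by omega)]
      simp

-- port B computes the full counting-sort relabelling
theorem B_eq_relab (text : String) :
    get_order_list_py_alt text
      = relabSuf 91 (ords text) []
          (ords text) := by
  unfold get_order_list_py_alt
  set l := ords text with hl
  obtain ⟨hclen, hcval⟩ := bCountLemma l (List.replicate 26 (0 : Int)) (by simp)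
  have hc : ∀ k : Nat, k < 26 →
      (l.foldl bCount (List.replicate 26 (0 : Int))).getD k 0 = cntEqI l (65 + k) := by
    intro k hk
    rw [hcval k hk, List.getD_eq_getElem?_getD, List.getElem?_replicate, if_pos hk]
    simp
  have hnxt := bOffsLemma (l.foldl bCount (List.replicate 26 (0 : Int))) l hc 26 0
    (List.replicate 26 (0 : Int)) 0 rfl (by simp)
    (by rw [show ((65 : Int) + ((0 : Nat) : Int)) = 65 by norm_num, cntLtI_65])
    (fun j hj => absurd hj (by omega))
  have hnxt' : ∀ j : Nat, j < 26 →
      (((PySem.List.pyRange 0 26 1).foldl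
        (bOffs (l.foldl bCount (List.replicate 26 (0 : Int))))
        (List.replicate 26 (0 : Int), 0)).1).getD j 0 = cntLtI l (65 + j) := by
    intro j hj
    have := hnxt j hj
    rwa [show (((0 : Nat)) : Int) = (0 : Int) by norm_num] at this
  have hlen26 : ∀ (r : List Int) (st : List Int × Int),
      ((r.foldl (bOffs (l.foldl bCount (List.replicate 26 (0 : Int)))) st).1).length
        = st.1.length := by
    intro r
    induction r with
    | nil => intro st; rfl
    | cons y ys ihy =>
      intro st
      rw [List.foldl_cons, ihy]
      unfold bOffs
      simp [PySem.List.length_pySetD]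
  have hout := bOutLemma l l [] []
    (((PySem.List.pyRange 0 26 1).foldl
        (bOffs (l.foldl bCount (List.replicate 26 (0 : Int))))
        (List.replicate 26 (0 : Int), 0)).1)
    (by rw [hlen26]; simp)
    (fun k hk => by rw [hnxt' k hk]; simp)
  simpa using hout

-- ===== tight-direction lemmas =====

theorem passF_snd_mono (i : Int) (l : List Int) (o : Int) : o ≤ (passF i l o).2 := by
  induction l generalizing o with
  | nil => simp [passF_nil]
  | cons x xs ih =>
    rw [passF_cons]
    split_ifs
    · have := ih (o + 1)
      simp only []
      omega
    · simpa using ih o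

theorem passF_get?_ne (i : Int) (l : List Int) (o : Int) (j : Nat) (v : Int)
    (hj : l[j]? = some v) (hv : v ≠ i) : (passF i l o).1[j]? = some v := by
  induction l generalizing o j with
  | nil => simp at hj
  | cons x xs ih =>
    cases j with
    | zero =>
      simp only [List.getElem?_cons_zero, Option.some_inj] at hj
      subst hj
      rw [passF_cons, if_neg hv]
      simp
    | succ j =>
      simp only [List.getElem?_cons_succ] at hj
      rw [passF_cons]
      split_ifs
      · simpa using ih (o + 1) j hj
      · simpa using ih o j hj

theorem passF_get?_eq (i : Int) (l : List Int) (o : Int) (j : Nat)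
    (hj : l[j]? = some i) :
    ∃ w, (passF i l o).1[j]? = some w ∧ o ≤ w ∧ w < (passF i l o).2 := by
  induction l generalizing o j with
  | nil => simp at hj
  | cons x xs ih =>
    cases j with
    | zero =>
      simp only [List.getElem?_cons_zero, Option.some_inj] at hj
      subst hj
      rw [passF_cons, if_pos rfl]
      refine ⟨o, by simp, le_refl o, ?_⟩
      have := passF_snd_mono x xs (o + 1)
      simp only []
      omega
    | succ j =>
      simp only [List.getElem?_cons_succ] at hj
      rw [passF_cons]
      by_cases hx : x = i
      · rw [if_pos hx]
        obtain ⟨w, h1, h2, h3⟩ := ih (o + 1) j hj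
        exact ⟨w, by simpa using h1, by omega, by simpa using h3⟩
      · rw [if_neg hx]
        obtain ⟨w, h1, h2, h3⟩ := ih o j hj
        exact ⟨w, by simpa using h1, h2, by simpa using h3⟩

theorem afold_cons (a : Int) (h : a < 91) (l : List Int) (o : Int) :
    afold a l o = afold (a + 1) (passF a l o).1 (passF a l o).2 := by
  unfold afold
  rw [PySem.List.pyRange_one_cons h, List.foldl_cons]

-- cells whose value no remaining pass can match stay put
theorem FU : ∀ (n : Nat) (a : Int), a + n = 91 →
    ∀ (l : List Int) (o : Int) (j : Nat) (v : Int), l[j]? = some v →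
    ¬(a ≤ v ∧ v ≤ 90) → (afold a l o).1[j]? = some v := by
  intro n
  induction n with
  | zero =>
    intro a ha l o j v hj _
    unfold afold
    rw [PySem.List.pyRange_one_eq_nil (by omega)]
    exact hj
  | succ n ih =>
    intro a ha l o j v hj hv
    rw [afold_cons a (by omega)]
    exact ih (a + 1) (by omega) _ _ j v
      (passF_get?_ne a l o j v hj (by omega)) (by omega)

-- a cell already holding a matchable value below the running order counter only grows
theorem FM : ∀ (n : Nat) (a : Int), a + n = 91 →
    ∀ (l : List Int) (o : Int) (j : Nat) (v : Int), l[j]? = some v →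
    a ≤ v → v ≤ 90 → v < o →
    ∃ w, (afold a l o).1[j]? = some w ∧ v < w := by
  intro n
  induction n with
  | zero => intro a ha l o j v _ h1 h2 _; omega
  | succ n ih =>
    intro a ha l o j v hj h1 h2 h3
    rw [afold_cons a (by omega)]
    by_cases hv : v = a
    · subst hv
      obtain ⟨w1, hw1, hw2, hw3⟩ := passF_get?_eq v l o j hj
      by_cases hw : (v + 1) ≤ w1 ∧ w1 ≤ 90
      · obtain ⟨w, hwa, hwb⟩ := ih (v + 1) (by omega) _ _ j w1 hw1 hw.1 hw.2 hw3
        exact ⟨w, hwa, by omega⟩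
      · exact ⟨w1, FU n (v + 1) (by omega) _ _ j w1 hw1 hw, by omega⟩
    · have hne := passF_get?_ne a l o j v hj (by omega)
      have hmono := passF_snd_mono a l o
      exact ih (a + 1) (by omega) _ _ j v hne (by omega) h2 (by omega)

-- the t-th occurrence of x exists at some position
theorem occ : ∀ (l : List Int) (x : Int) (t : Nat), t < l.count x →
    ∃ j : Nat, l[j]? = some x ∧ (l.take j).count x = t := by
  intro l
  induction l with
  | nil => intro x t h; simp at h
  | cons y ys ih =>
    intro x t h
    by_cases hy : y = x
    · subst hy
      cases t with
      | zero => exact ⟨0, by simp, by simp⟩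
      | succ t =>
        have : t < ys.count y := by
          rw [List.count_cons_self] at h; omega
        obtain ⟨j, h1, h2⟩ := ih y t this
        exact ⟨j + 1, by simpa using h1, by simp [List.take_succ_cons, h2]⟩
    · have : t < ys.count x := by
        rw [List.count_cons_of_ne hy] at h; exact h
      obtain ⟨j, h1, h2⟩ := ih x t this
      exact ⟨j + 1, by simpa using h1, by simp [List.take_succ_cons, List.count_cons_of_ne hy, h2]⟩

-- positional reading of relabSuf
theorem relab_get? (i : Int) (full : List Int) :
    ∀ (suf pre : List Int) (j : Nat) (x : Int), suf[j]? = some x →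
    (relabSuf i full pre suf)[j]?
      = some (if 65 ≤ x ∧ x < i
              then cntLtI full x + (((pre ++ suf.take j).count x) : Int) else x) := by
  intro suf
  induction suf with
  | nil => intro pre j x h; simp at h
  | cons y ys ih =>
    intro pre j x hj
    cases j with
    | zero =>
      simp only [List.getElem?_cons_zero, Option.some_inj] at hj
      subst hj
      unfold relabSuf
      simp
    | succ j =>
      simp only [List.getElem?_cons_succ] at hj
      unfold relabSuf
      rw [List.getElem?_cons_succ]
      rw [ih (pre ++ [y]) j x hj]
      congr 2
      simp [List.take_succ_cons]

-- ¬D gives the no-cascade hypothesis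
theorem notD_H (text : String) (hD : ¬ D_get_order_list_py text) :
    ∀ x, 65 ≤ x → x ≤ 89 →
      cntEqI (ords text) x = 0 ∨
      cntLtI (ords text) x + cntEqI (ords text) x - 1 ≤ x ∨
      90 < cntLtI (ords text) x := by
  intro x hx1 hx2
  by_cases h3 : 90 < cntLtI (ords text) x
  · exact Or.inr (Or.inr h3)
  · have hx' : ¬(upTo text x ≤ 90 ∧ x + 2 ≤ upTo text (x + 1)) := by
      intro hcon
      exact hD ⟨x, by rw [PySem.List.mem_pyRange_one]; omega, hcon⟩
    rw [upTo_eq, upTo_eq, cntLtI_succ _ x hx1] at hx'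
    rcases not_and_or.mp hx' with h | h
    · omega
    · exact Or.inr (Or.inl (by omega))

-- the core of the tightness argument, over a plain ord list
theorem tight_core (l : List Int)
    (hD : ∃ n : Nat, n < 25 ∧ cntLtI l (65 + (n : Int)) ≤ 90 ∧
      (65 + (n : Int)) + 2 ≤ cntLtI l (65 + (n : Int) + 1)) :
    ∃ (j : Nat) (w v : Int), (afold 65 l 0).1[j]? = some w ∧
      (relabSuf 91 l [] l)[j]? = some v ∧ v ≠ w := by
  classical
  have hfs := Nat.find_spec hD
  set n0 := Nat.find hD with hn0
  obtain ⟨hn25, hlt90, hup⟩ := hfs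
  obtain ⟨istar, histar⟩ : ∃ i : Int, i = 65 + (n0 : Int) := ⟨_, rfl⟩
  have hi1 : 65 ≤ istar := by omega
  have hi2 : istar ≤ 89 := by omega
  have hsucc := cntLtI_succ l (65 + (n0 : Int)) (by omega)
  have hEnn := cntEqI_nonneg l (65 + (n0 : Int))
  -- at the minimal witness the letter is actually present
  have hcnt1 : 1 ≤ cntEqI l (65 + (n0 : Int)) := by
    by_contra hc
    have hE0 : cntEqI l (65 + (n0 : Int)) = 0 := by omega
    have hbig : 65 + (n0 : Int) + 2 ≤ cntLtI l (65 + (n0 : Int)) := by omega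
    rcases Nat.eq_zero_or_pos n0 with h0 | hpos
    · have h65 := cntLtI_65 l
      rw [h0] at hbig
      norm_num at hbig
      omega
    · have hmin := Nat.find_min hD (show n0 - 1 < Nat.find hD by rw [← hn0]; omega)
      have hcast : (((n0 - 1 : Nat)) : Int) = (n0 : Int) - 1 := by omega
      have hmono := cntLtI_succ l (65 + ((n0 : Int) - 1)) (by omega)
      rw [show (65 + ((n0 : Int) - 1) + 1) = 65 + (n0 : Int) by ring] at hmono
      have hE2 := cntEqI_nonneg l (65 + ((n0 : Int) - 1))
      refine hmin ⟨by omega, ?_, ?_⟩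
      · rw [hcast]
        omega
      · rw [hcast, show (65 + ((n0 : Int) - 1) + 1) = 65 + (n0 : Int) by ring]
        omega
  have hsum : (65 + (n0 : Int)) + 2 ≤ cntLtI l (65 + (n0 : Int)) + cntEqI l (65 + (n0 : Int)) := by
    omega
  have hceq : cntEqI l istar = cntEqI l (65 + (n0 : Int)) := by rw [histar]
  have hclt : cntLtI l istar = cntLtI l (65 + (n0 : Int)) := by rw [histar]
  have hcnt1' : 1 ≤ cntEqI l istar := by omega
  have hlt90' : cntLtI l istar ≤ 90 := by omega
  -- no cascade strictly below i*
  have Hmin : ∀ x, 65 ≤ x → x < istar →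
      cntEqI l x = 0 ∨ cntLtI l x + cntEqI l x - 1 ≤ x ∨ 90 < cntLtI l x := by
    intro x hx1 hx2
    have hmin := Nat.find_min hD
      (show (x - 65).toNat < Nat.find hD by rw [← hn0]; omega)
    have hxsucc := cntLtI_succ l x hx1
    by_cases h3 : 90 < cntLtI l x
    · exact Or.inr (Or.inr h3)
    · have hq : ¬(cntLtI l x ≤ 90 ∧ x + 2 ≤ cntLtI l (x + 1)) := by
        intro hcon
        refine hmin ⟨by omega, ?_, ?_⟩
        · rw [show (65 + ((((x - 65).toNat : Nat)) : Int)) = x by omega]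
          exact hcon.1
        · rw [show (65 + ((((x - 65).toNat : Nat)) : Int)) = x by omega]
          exact hcon.2
      rcases not_and_or.mp hq with h | h
      · omega
      · exact Or.inr (Or.inl (by omega))
  -- rank r of the first cascading occurrence, and its occurrence index t
  obtain ⟨r, hr⟩ : ∃ r : Int, r = max (cntLtI l istar) (istar + 1) := ⟨_, rfl⟩
  have hri : istar < r := by omega
  have hr90 : r ≤ 90 := by omega
  have hrub : r ≤ cntLtI l istar + cntEqI l istar - 1 := by omega
  obtain ⟨t, htr⟩ : ∃ t : Nat, (t : Int) = r - cntLtI l istar := by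
    have h0 : 0 ≤ r - cntLtI l istar := by
      have : 0 ≤ cntEqI l istar - 1 := by omega
      omega
    exact ⟨(r - cntLtI l istar).toNat, by omega⟩
  have htc : t < l.count istar := by
    have : (t : Int) < (l.count istar : Int) := by
      unfold cntEqI at hrub; omega
    exact_mod_cast this
  obtain ⟨j, hjget, hjtake⟩ := occ l istar t htc
  -- run A's passes 65..i*-1 (no cascade below i*)
  have hfold := foldRange l n0 65 (by norm_num) (by omega)
    (fun x h1 _ h3 => Hmin x h1 (by push_cast at h3 ⊢; omega))
  rw [relabSuf_65, cntLtI_65] at hfold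
  -- the pass at i*
  have hpass := passLemma istar l hi1 (by omega)
    (fun x h1 h2 => Hmin x h1 h2) l [] rfl
  simp only [List.count_nil, Nat.cast_zero, add_zero] at hpass
  -- value at position j after pass i*
  have hget' : (relabSuf (istar + 1) l [] l)[j]? = some r := by
    rw [relab_get? (istar + 1) l l [] j istar hjget]
    rw [if_pos ⟨hi1, by omega⟩]
    simp only [List.nil_append]
    rw [hjtake, htr]
    congr 1
    ring
  have horder : r < cntLtI l istar + ((l.count istar : Nat) : Int) := by
    unfold cntEqI at hrub; omega
  -- the first segment of A's fold
  have hseg : (PySem.List.pyRange 65 istar 1).foldl (fun s i => passF i s.1 s.2) (l, 0)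
      = (relabSuf istar l [] l, cntLtI l istar) := by
    rw [histar]
    exact hfold
  -- A's final value at j exceeds r
  have hA : ∃ w, (afold 65 l 0).1[j]? = some w ∧ r < w := by
    unfold afold
    rw [PySem.List.pyRange_one_append 65 istar 91 (by omega) (by omega), List.foldl_append,
      hseg, PySem.List.pyRange_one_cons (show istar < 91 by omega), List.foldl_cons]
    show ∃ w, ((PySem.List.pyRange (istar + 1) 91 1).foldl (fun s i => passF i s.1 s.2)
        (passF istar (relabSuf istar l [] l) (cntLtI l istar))).1[j]? = some w ∧ r < w
    rw [hpass]
    have h := FM (25 - n0) (istar + 1) (by push_cast; omega)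
      (relabSuf (istar + 1) l [] l) (cntLtI l istar + ((l.count istar : Nat) : Int))
      j r hget' (by omega) hr90 horder
    unfold afold at h
    exact h
  -- B's value at j is exactly r
  have hB : (relabSuf 91 l [] l)[j]? = some r := by
    rw [relab_get? 91 l l [] j istar hjget]
    rw [if_pos ⟨hi1, by omega⟩]
    simp only [List.nil_append]
    rw [hjtake, htr]
    congr 1
    ring
  obtain ⟨w, hw1, hw2⟩ := hA
  exact ⟨j, w, r, hw1, hB, by omega⟩

-- ===== VERDICT (by name: the statement is the Claim_ definition above) =====
theorem get_order_list_py_spec : Claim_unchanged_get_order_list_py := by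
  intro text _ hD
  rw [A_eq_afold, B_eq_relab]
  have H := notD_H text hD
  have hfold := foldRange (ords text) 26 65
    (by norm_num) (by norm_num) (fun x h1 h2 _ => H x h1 h2)
  rw [relabSuf_65, cntLtI_65] at hfold
  unfold afold
  rw [show (91 : Int) = 65 + ((26 : Nat) : Int) by norm_num, hfold]

set_option maxRecDepth 100000 in
set_option maxHeartbeats 4000000 in
theorem get_order_list_py_changed : Claim_changed_get_order_list_py := by
  unfold Claim_changed_get_order_list_py
  refine ⟨by decide, by decide, by decide, by decide, by decide⟩

theorem get_order_list_py_tight : Claim_exact_get_order_list_py := by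
  intro text _ hD
  have hex : ∃ n : Nat, n < 25 ∧ cntLtI (ords text) (65 + (n : Int)) ≤ 90 ∧
      (65 + (n : Int)) + 2 ≤ cntLtI (ords text) (65 + (n : Int) + 1) := by
    obtain ⟨i, hmem, h1, h2⟩ := hD
    rw [PySem.List.mem_pyRange_one] at hmem
    rw [upTo_eq] at h1 h2
    refine ⟨(i - 65).toNat, by omega, ?_, ?_⟩
    · rw [show (65 + (((i - 65).toNat : Nat)) : Int) = i by omega]
      exact h1
    · rw [show (65 + (((i - 65).toNat : Nat)) : Int) = i by omega]
      exact h2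
  obtain ⟨j, w, v, hw, hv, hne⟩ := tight_core _ hex
  intro heq
  rw [A_eq_afold] at heq
  rw [heq] at hw
  rw [← B_eq_relab] at hv
  rw [hv] at hw
  exact hne (Option.some_inj.mp hw)
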